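-- pv_equiv track=rewrite | github.com/karthickrocks1/Image_Sorter | find_first_numbers.py | find_first_numbers
-- ===== SOURCE A (Python) =====
-- def find_first_numbers(text):
--   """
--   This function finds the first group of consecutive digits in a string, i.e. the date of photo in this case.
--
--   Args:
--       text: The string to search for numbers.
--
--   Returns:
--       A string containing the first group of digits found, or None if no digits are found.
--   """
--   digits = ""
--   for char in text:
--     if char.isdigit():
--       digits += char
--     elif digits:
--       break  # Stop if a non-digit follows a digit
--   return digits
-- ===== SOURCE B (Python) =====
-- from itertools import groupby
--
-- def find_first_numbers(text):
--   for is_digit, run in groupby(text, str.isdigit):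
--     if is_digit:
--       return "".join(run)
--   return ""
-- ===== Notes on version B (the rewrite author's own statement) =====
-- stated objective: idiomatic
-- what changed: Replaces the accumulate-and-break character loop with run-grouping: groupby(text, str.isdigit) partitions the string into maximal equal-key runs and B returns the first run whose key is True.
import Mathlib
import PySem

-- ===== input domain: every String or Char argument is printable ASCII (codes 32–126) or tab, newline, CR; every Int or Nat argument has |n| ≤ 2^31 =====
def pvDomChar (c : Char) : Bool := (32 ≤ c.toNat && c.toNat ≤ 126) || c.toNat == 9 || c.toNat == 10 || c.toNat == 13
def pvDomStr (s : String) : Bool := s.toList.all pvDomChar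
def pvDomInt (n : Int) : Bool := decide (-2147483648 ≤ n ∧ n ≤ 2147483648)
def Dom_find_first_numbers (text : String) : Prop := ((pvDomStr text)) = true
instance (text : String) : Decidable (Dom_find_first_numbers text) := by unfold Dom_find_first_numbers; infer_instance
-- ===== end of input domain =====

-- B replaces A's accumulate-and-break loop with run-grouping (groupby by isdigit, first True-keyed run); same return value.

-- ===== PORT A =====
-- loop of A: accumulate digits, break on the first non-digit after a digit
def ffnLoop (digits : List Char) : List Char → List Char
  | [] => digits
  | c :: cs =>
    if PySem.Chars.isdigit c then ffnLoop (digits ++ [c]) cs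
    else if digits ≠ [] then digits
    else ffnLoop digits cs

def find_first_numbers (text : String) : String :=
  String.ofList (ffnLoop [] text.toList)

-- ===== PORT B =====
-- itertools.groupby(text, str.isdigit): maximal runs of characters with equal key, in order
def groupRuns : List Char → List (Bool × List Char)
  | [] => []
  | c :: cs =>
    match groupRuns cs with
    | (k, run) :: rest =>
      if PySem.Chars.isdigit c == k then (k, c :: run) :: rest
      else (PySem.Chars.isdigit c, [c]) :: (k, run) :: rest
    | [] => [(PySem.Chars.isdigit c, [c])]

def find_first_numbers_alt (text : String) : String :=
  match (groupRuns text.toList).find? (fun g => g.1) with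
  | some g => String.ofList g.2
  | none => ""

-- ===== PRECONDITION & SPEC =====
def Spec_find_first_numbers (text : String) (out : String) : Prop := out = find_first_numbers_alt text
instance (text : String) (out : String) : Decidable (Spec_find_first_numbers text out) := by unfold Spec_find_first_numbers; infer_instance

-- ===== CLAIM (what is proved, stated in full; the proofs are below) =====
def Claim_equal_find_first_numbers : Prop := ∀ (text : String), Dom_find_first_numbers text → Spec_find_first_numbers text (find_first_numbers text)

-- ===== LEMMAS AND PROOFS =====

-- the first-true-run extraction that find_first_numbers_alt performs
def ffnExtract (gs : List (Bool × List Char)) : List Char :=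
  match gs.find? (fun g => g.1) with
  | some g => g.2
  | none => []

-- the common normal form: leading digit run after skipping leading non-digits
def ffnB0 (cs : List Char) : List Char :=
  (cs.dropWhile (fun c => !PySem.Chars.isdigit c)).takeWhile PySem.Chars.isdigit

-- one-step unfolding of groupRuns (proofs only)
theorem groupRuns_cons (c : Char) (cs : List Char) :
    groupRuns (c :: cs) =
      (match groupRuns cs with
        | (k, run) :: rest =>
          if PySem.Chars.isdigit c == k then (k, c :: run) :: rest
          else (PySem.Chars.isdigit c, [c]) :: (k, run) :: rest
        | [] => [(PySem.Chars.isdigit c, [c])]) := rfl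

-- the head run of groupRuns is the maximal leading run of the head's key
theorem groupRuns_head (c : Char) (cs : List Char) :
    ∃ rest, groupRuns (c :: cs) =
      (PySem.Chars.isdigit c,
        c :: cs.takeWhile (fun x => PySem.Chars.isdigit x == PySem.Chars.isdigit c)) :: rest := by
  induction cs generalizing c with
  | nil => exact ⟨[], by simp [groupRuns]⟩
  | cons x xs ih =>
    obtain ⟨rest, hx⟩ := ih x
    by_cases h : PySem.Chars.isdigit x = PySem.Chars.isdigit c
    · refine ⟨rest, ?_⟩
      rw [groupRuns_cons, hx]
      simp [h, List.takeWhile]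
    · have h' : (PySem.Chars.isdigit c == PySem.Chars.isdigit x) = false := by
        revert h; cases PySem.Chars.isdigit c <;> cases PySem.Chars.isdigit x <;> simp
      have h'' : (PySem.Chars.isdigit x == PySem.Chars.isdigit c) = false := by
        revert h; cases PySem.Chars.isdigit c <;> cases PySem.Chars.isdigit x <;> simp
      refine ⟨(PySem.Chars.isdigit x,
        x :: xs.takeWhile (fun y => PySem.Chars.isdigit y == PySem.Chars.isdigit x)) :: rest, ?_⟩
      rw [groupRuns_cons, hx]
      simp [h', h'', List.takeWhile]

-- extracting the first true run from the groups equals skip-then-take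
theorem ffnExtract_groupRuns (cs : List Char) : ffnExtract (groupRuns cs) = ffnB0 cs := by
  induction cs with
  | nil => simp [ffnExtract, groupRuns, ffnB0]
  | cons c cs ih =>
    cases cs with
    | nil =>
      by_cases hc : PySem.Chars.isdigit c
      all_goals simp [ffnExtract, groupRuns, ffnB0, hc, List.find?]
    | cons x xs =>
      obtain ⟨rest, hx⟩ := groupRuns_head x xs
      rw [hx] at ih
      rw [groupRuns_cons, hx]
      by_cases hc : PySem.Chars.isdigit c
      · by_cases hxd : PySem.Chars.isdigit x
        · -- both digits: merge into the head run
          simp [ffnExtract, List.find?, hxd, ffnB0, List.dropWhile] at ih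
          simp [hc, hxd, ffnExtract, ffnB0, List.dropWhile, List.takeWhile]
        · -- digit then non-digit: new singleton true run in front
          simp [hc, hxd, ffnExtract, ffnB0, List.dropWhile, List.takeWhile]
      · by_cases hxd : PySem.Chars.isdigit x
        · -- non-digit then digit: new singleton false run, skipped by find?
          simp [ffnExtract, List.find?, hxd, ffnB0, List.dropWhile, hc] at ih ⊢
        · -- both non-digit: merged false run, skipped either way
          simp [ffnExtract, List.find?, hxd, ffnB0, List.dropWhile, hc] at ih ⊢
          simpa [hc, hxd] using ih

-- once the accumulator is nonempty, A's loop appends the leading digit run and stops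
theorem ffnLoop_nonempty (cs : List Char) (acc : List Char) (h : acc ≠ []) :
    ffnLoop acc cs = acc ++ cs.takeWhile PySem.Chars.isdigit := by
  induction cs generalizing acc with
  | nil => simp [ffnLoop]
  | cons c cs ih =>
    by_cases hd : PySem.Chars.isdigit c
    · simp [ffnLoop, hd, ih (acc ++ [c]) (by simp), List.takeWhile]
    · simp [ffnLoop, hd, h, List.takeWhile]

-- with an empty accumulator, A's loop computes the skip-then-take normal form
theorem ffnLoop_nil (cs : List Char) : ffnLoop [] cs = ffnB0 cs := by
  induction cs with
  | nil => simp [ffnLoop, ffnB0]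
  | cons c cs ih =>
    by_cases hd : PySem.Chars.isdigit c
    · simp [ffnLoop, hd, ffnLoop_nonempty cs [c] (by simp), ffnB0, List.dropWhile]
    · simp [ffnLoop, hd, ih, ffnB0, List.dropWhile]

-- B's port is the extraction of the first true run
theorem alt_eq_extract (text : String) :
    find_first_numbers_alt text = String.ofList (ffnExtract (groupRuns text.toList)) := by
  unfold find_first_numbers_alt ffnExtract
  cases (groupRuns text.toList).find? (fun g => g.1) <;> rfl

-- ===== VERDICT (by name: the statement is the Claim_ definition above) =====
theorem find_first_numbers_spec : Claim_equal_find_first_numbers := by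
  intro text _
  unfold Spec_find_first_numbers find_first_numbers
  rw [ffnLoop_nil, alt_eq_extract, ffnExtract_groupRuns]
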